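-- pv_equiv track=rewrite | github.com/anvitha-rao10/agentic-ai-devops | services/preprocessor/app/processing/build_context.py | build_context_from_indices
-- ===== SOURCE A (Python) =====
-- def build_context_from_indices(
--     logs: list[str],
--     error_indices: list[int],
--     before: int = 10,
--     after: int = 10
-- ) -> list[str]:
--
--     contexts = []
--     seen_ranges = []
--
--     for idx in error_indices:
--         start = max(0, idx - before)
--         end = min(len(logs), idx + after)
--
--         # avoid duplicate overlapping blocks
--         if any(start <= r[1] and end >= r[0] for r in seen_ranges):
--             continue
--
--         seen_ranges.append((start, end))
--         block = "\n".join(logs[start:end])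
--         contexts.append(block)
--
--     return contexts
-- ===== SOURCE B (Python) =====
-- def build_context_from_indices(
--     logs: list[str],
--     error_indices: list[int],
--     before: int = 10,
--     after: int = 10
-- ) -> list[str]:
--     # Keep accepted ranges sorted by start; overlap test scans only the prefix
--     # with start <= end (early exit), insertion keeps the order.
--     contexts = []
--     ranges = []  # accepted (start, end), sorted by start
--     n = len(logs)
--     for idx in error_indices:
--         start = max(0, idx - before)
--         end = min(n, idx + after)
--         overlap = False
--         for (a, b) in ranges:
--             if a > end:
--                 break
--             if b >= start:
--                 overlap = True
--                 break
--         if overlap: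
--             continue
--         i = 0
--         while i < len(ranges) and ranges[i][0] < start:
--             i += 1
--         ranges.insert(i, (start, end))
--         contexts.append("\n".join(logs[start:end]))
--     return contexts
-- ===== Notes on version B (the rewrite author's own statement) =====
-- stated objective: alternative
-- what changed: B keeps the accepted ranges in a list sorted by start (sorted insertion) so the overlap test scans only the prefix of ranges starting at or before the new block's end and exits early, instead of A's unordered any() scan over all accepted ranges.
import Mathlib
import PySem

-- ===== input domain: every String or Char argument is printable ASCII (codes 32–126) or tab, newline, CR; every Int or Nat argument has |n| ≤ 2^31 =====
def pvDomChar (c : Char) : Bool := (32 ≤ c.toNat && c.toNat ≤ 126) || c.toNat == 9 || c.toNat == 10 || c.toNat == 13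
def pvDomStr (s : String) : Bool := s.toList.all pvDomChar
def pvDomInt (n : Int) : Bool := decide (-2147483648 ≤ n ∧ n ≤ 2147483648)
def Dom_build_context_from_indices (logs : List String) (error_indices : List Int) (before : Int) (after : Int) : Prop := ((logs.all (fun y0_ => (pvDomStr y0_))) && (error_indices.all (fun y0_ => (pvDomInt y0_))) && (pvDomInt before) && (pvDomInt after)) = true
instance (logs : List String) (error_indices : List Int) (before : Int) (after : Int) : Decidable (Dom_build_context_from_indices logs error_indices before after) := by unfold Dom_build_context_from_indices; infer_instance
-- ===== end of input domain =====

-- B keeps the accepted ranges sorted by start so the overlap scan can stop at the first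
-- range starting past `end` (alternative data-structure; same return value as A).


-- ===== PORT A =====
-- one iteration of A's for-loop; state = (contexts, seen_ranges)
def pvStepA (logs : List String) (before after : Int)
    (st : List String × List (Int × Int)) (idx : Int) : List String × List (Int × Int) :=
  let start := max 0 (idx - before)
  let ed := min (logs.length : Int) (idx + after)
  if st.2.any (fun r => decide (start ≤ r.2) && decide (ed ≥ r.1)) then st
  else (st.1 ++ [PySem.Str.join "\n" (PySem.List.slice logs (some start) (some ed))],
        st.2 ++ [(start, ed)])

def build_context_from_indices (logs : List String) (error_indices : List Int) (before : Int) (after : Int) : List String :=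
  (error_indices.foldl (pvStepA logs before after) ([], [])).1

-- ===== PORT B =====
-- B's inner for-loop: scan the sorted ranges, stop at the first start past `ed`
def pvOverlap (start ed : Int) : List (Int × Int) → Bool
  | [] => false
  | (a, b) :: t => if a > ed then false else if b ≥ start then true else pvOverlap start ed t

-- B's while-loop + insert: insert before the first range whose start is ≥ start
def pvInsert (se : Int × Int) : List (Int × Int) → List (Int × Int)
  | [] => [se]
  | (a, b) :: t => if a < se.1 then (a, b) :: pvInsert se t else se :: (a, b) :: t

-- B's main loop over error_indices
def pvGoB (logs : List String) (n before after : Int) : List Int → List (Int × Int) → List String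
  | [], _ => []
  | idx :: rest, ranges =>
    let start := max 0 (idx - before)
    let ed := min n (idx + after)
    if pvOverlap start ed ranges then pvGoB logs n before after rest ranges
    else PySem.Str.join "\n" (PySem.List.slice logs (some start) (some ed)) ::
         pvGoB logs n before after rest (pvInsert (start, ed) ranges)

def build_context_from_indices_alt (logs : List String) (error_indices : List Int) (before : Int) (after : Int) : List String :=
  pvGoB logs (logs.length : Int) before after error_indices []

-- ===== PRECONDITION & SPEC =====
def Spec_build_context_from_indices (logs : List String) (error_indices : List Int) (before : Int) (after : Int) (out : List String) : Prop := out = build_context_from_indices_alt logs error_indices before after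
instance (logs : List String) (error_indices : List Int) (before : Int) (after : Int) (out : List String) : Decidable (Spec_build_context_from_indices logs error_indices before after out) := by unfold Spec_build_context_from_indices; infer_instance

-- ===== CLAIM (what is proved, stated in full; the proofs are below) =====
def Claim_equal_build_context_from_indices : Prop := ∀ (logs : List String) (error_indices : List Int) (before : Int) (after : Int), Dom_build_context_from_indices logs error_indices before after → Spec_build_context_from_indices logs error_indices before after (build_context_from_indices logs error_indices before after)

-- ===== LEMMAS AND PROOFS =====

-- membership through pvInsert
lemma pvInsert_perm (se : Int × Int) : ∀ (l : List (Int × Int)), (pvInsert se l).Perm (se :: l)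
  | [] => List.Perm.refl _
  | (a, b) :: t => by
    unfold pvInsert
    split
    · exact ((pvInsert_perm se t).cons (a, b)).trans (List.Perm.swap _ _ _)
    · exact List.Perm.refl _

-- sortedness (by start) is preserved by pvInsert
lemma pvInsert_pairwise (se : Int × Int) :
    ∀ (l : List (Int × Int)), l.Pairwise (fun p q => p.1 ≤ q.1) →
      (pvInsert se l).Pairwise (fun p q => p.1 ≤ q.1)
  | [], _ => by simp [pvInsert]
  | (a, b) :: t, h => by
    rcases List.pairwise_cons.1 h with ⟨hab, ht⟩
    unfold pvInsert
    split
    · refine List.pairwise_cons.2 ⟨?_, pvInsert_pairwise se t ht⟩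
      intro y hy
      rcases List.mem_cons.1 ((pvInsert_perm se t).mem_iff.1 hy) with hy | hy
      · subst hy; omega
      · exact hab y hy
    · refine List.pairwise_cons.2 ⟨?_, h⟩
      intro y hy
      rcases List.mem_cons.1 hy with hy | hy
      · subst hy; omega
      · exact le_trans (by omega) (hab y hy)

-- on a start-sorted list the early-exit scan computes A's `any` test
lemma pvOverlap_eq_any (start ed : Int) :
    ∀ (l : List (Int × Int)), l.Pairwise (fun p q => p.1 ≤ q.1) →
      pvOverlap start ed l = l.any (fun r => decide (start ≤ r.2) && decide (ed ≥ r.1))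
  | [], _ => rfl
  | (a, b) :: t, h => by
    rcases List.pairwise_cons.1 h with ⟨hab, ht⟩
    unfold pvOverlap
    by_cases hae : a > ed
    · simp only [if_pos hae, List.any_cons]
      have h1 : decide (ed ≥ a) = false := by simp; omega
      have h2 : t.any (fun r => decide (start ≤ r.2) && decide (ed ≥ r.1)) = false := by
        simp only [List.any_eq_false]
        intro r hr
        have := hab r hr
        simp; omega
      simp [h1, h2]
    · simp only [if_neg hae]
      by_cases hsb : b ≥ start
      · have h1 : decide (start ≤ b) = true := by simpa using hsb
        have h2 : decide (ed ≥ a) = true := by simp; omega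
        simp [hsb, h2]
      · have h1 : decide (start ≤ b) = false := by simpa using hsb
        simp [hsb, pvOverlap_eq_any start ed t ht]

-- the loop invariant: A's seen_ranges is a permutation of B's sorted ranges
lemma pvMain (logs : List String) (before after : Int) :
    ∀ (idxs : List Int) (cs : List String) (seen ranges : List (Int × Int)),
      seen.Perm ranges → ranges.Pairwise (fun p q => p.1 ≤ q.1) →
      (idxs.foldl (pvStepA logs before after) (cs, seen)).1 =
        cs ++ pvGoB logs (logs.length : Int) before after idxs ranges
  | [], cs, seen, ranges, _, _ => by simp [pvGoB]
  | idx :: rest, cs, seen, ranges, hperm, hsort => by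
    simp only [List.foldl_cons, pvGoB]
    have hov : seen.any (fun r => decide (max 0 (idx - before) ≤ r.2) &&
        decide (min (logs.length : Int) (idx + after) ≥ r.1)) =
        pvOverlap (max 0 (idx - before)) (min (logs.length : Int) (idx + after)) ranges := by
      rw [pvOverlap_eq_any _ _ ranges hsort]
      exact hperm.any_eq
    by_cases hc : pvOverlap (max 0 (idx - before)) (min (logs.length : Int) (idx + after)) ranges
    · rw [show pvStepA logs before after (cs, seen) idx = (cs, seen) by
        simp only [pvStepA]; rw [hov, hc]; simp]
      rw [pvMain logs before after rest cs seen ranges hperm hsort, hc]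
      simp
    · rw [show pvStepA logs before after (cs, seen) idx =
        (cs ++ [PySem.Str.join "\n" (PySem.List.slice logs (some (max 0 (idx - before)))
            (some (min (logs.length : Int) (idx + after))))],
         seen ++ [(max 0 (idx - before), min (logs.length : Int) (idx + after))]) by
        simp only [pvStepA]; rw [hov, Bool.eq_false_iff.2 hc]; simp]
      rw [pvMain logs before after rest _ _
            (pvInsert (max 0 (idx - before), min (logs.length : Int) (idx + after)) ranges)
            (((List.perm_append_singleton _ _).trans (hperm.cons _)).trans
              (pvInsert_perm _ ranges).symm)
            (pvInsert_pairwise _ ranges hsort)]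
      rw [Bool.eq_false_iff.2 hc]
      simp

-- ===== VERDICT (by name: the statement is the Claim_ definition above) =====
theorem build_context_from_indices_spec : Claim_equal_build_context_from_indices := by
  intro logs error_indices before after _
  unfold Spec_build_context_from_indices build_context_from_indices build_context_from_indices_alt
  simpa using pvMain logs before after error_indices [] [] [] (List.Perm.refl _) (by simp)
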